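-- pv_equiv track=rewrite | github.com/damianoazzolini/gentians | gentians/utils.py | is_valid_comparison_rule
-- ===== SOURCE A (Python) =====
-- def get_v0_v1_comparison(rule : str, p : int, incr : int) -> 'tuple[str,str]':
--     '''
--     From V0>V1 returns V0 and V1
--     Incr is 1 if the operator has 2 elements (>=,<=,==,!=)
--     '''
--     v0 = rule[p-2:p]
--     v1 = rule[p+incr+1:p+incr+3]
--     return v0, v1
--
-- def is_valid_comparison_rule(rule : str) -> bool:
--     '''
--     Hardcoded rules to remove comparison nonsense.
--     TODO: check this, since the ASP program should already prune this.
--     '''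
--     comp_2 = ['<=','>=',"!=","=="]
--     rule = rule.replace(' ','')
--     for ch in comp_2:
--         pos = [i for i in range(len(rule)) if rule.startswith(ch, i)]
--         if len(pos) > 0:
--             for p in pos:
--                 v0, v1 = get_v0_v1_comparison(rule, p, 1)
--                 if v0 == v1:
--                     return False
--
--     comp_1 = ['<','>']
--     for ch in comp_1:
--         pos = [pos for pos, char in enumerate(rule) if char == ch]
--         if len(pos) > 0:
--             for p in pos:
--                 v0, v1 = get_v0_v1_comparison(rule, p, 0)
--                 if v0 == v1:
--                     return False
--
--     return True
-- ===== SOURCE B (Python) =====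
-- def is_valid_comparison_rule(rule: str) -> bool:
--     rule = rule.replace(' ', '')
--     for i in range(len(rule)):
--         if rule[i] in '<>' and rule[i-2:i] == rule[i+1:i+3]:
--             return False
--         if rule[i:i+2] in ('<=', '>=', '!=', '==') and rule[i-2:i] == rule[i+2:i+4]:
--             return False
--     return True
-- ===== Notes on version B (the rewrite author's own statement) =====
-- stated objective: faster
-- what changed: Replaces six separate whole-string scans (one per operator, each materialising a position list before checking it) with a single left-to-right pass over indices that checks the 1-char and 2-char operator conditions at each position.
import Mathlib
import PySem

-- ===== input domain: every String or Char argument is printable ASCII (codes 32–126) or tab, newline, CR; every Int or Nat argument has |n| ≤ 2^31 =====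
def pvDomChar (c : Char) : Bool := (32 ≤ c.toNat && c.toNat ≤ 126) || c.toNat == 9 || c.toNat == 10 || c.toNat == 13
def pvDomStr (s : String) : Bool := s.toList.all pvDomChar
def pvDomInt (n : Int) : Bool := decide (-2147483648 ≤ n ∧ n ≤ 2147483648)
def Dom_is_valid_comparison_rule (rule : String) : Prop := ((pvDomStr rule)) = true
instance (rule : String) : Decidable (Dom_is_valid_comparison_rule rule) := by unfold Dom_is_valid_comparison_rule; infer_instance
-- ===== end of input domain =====

-- B replaces A's six per-operator scans (each building a position list first) by one left-to-right positional pass (objective: faster, constant-factor; measured).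

-- ===== PORT A =====
-- get_v0_v1_comparison, on the code-point list
def pvGetv (r : List Char) (p incr : Int) : List Char × List Char :=
  (PySem.List.slice r (some (p - 2)) (some p),
   PySem.List.slice r (some (p + incr + 1)) (some (p + incr + 3)))

-- inner 'for p in pos: … return False' loop; none = fell through
def pvInnerA (r : List Char) (incr : Int) : List Int → Option Bool
  | [] => none
  | p :: rest =>
    let vv := pvGetv r p incr
    if vv.1 = vv.2 then some false else pvInnerA r incr rest

-- [i for i in range(len(rule)) if rule.startswith(ch, i)] ; startswith(ch, i) with 0 ≤ i is startswith on drop i (exact)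
def pvPos2 (r : List Char) (ch : List Char) : List Int :=
  ((List.range r.length).filter (fun i => PySem.Chars.startswith (r.drop i) ch)).map (fun i => Int.ofNat i)

def pvLoop2 (r : List Char) : List (List Char) → Option Bool
  | [] => none
  | ch :: rest =>
    let pos := pvPos2 r ch
    if 0 < pos.length then
      match pvInnerA r 1 pos with
      | some b => some b
      | none => pvLoop2 r rest
    else pvLoop2 r rest

-- [pos for pos, char in enumerate(rule) if char == ch]
def pvPos1 (r : List Char) (ch : Char) : List Int :=
  ((PySem.List.enumerate r 0).filter (fun pc => pc.2 = ch)).map (fun pc => pc.1)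

def pvLoop1 (r : List Char) : List Char → Option Bool
  | [] => none
  | ch :: rest =>
    let pos := pvPos1 r ch
    if 0 < pos.length then
      match pvInnerA r 0 pos with
      | some b => some b
      | none => pvLoop1 r rest
    else pvLoop1 r rest

def is_valid_comparison_rule (rule : String) : Bool :=
  let r := PySem.Chars.replace rule.toList [' '] []
  match pvLoop2 r [['<','='], ['>','='], ['!','='], ['=','=']] with
  | some b => b
  | none =>
    match pvLoop1 r ['<', '>'] with
    | some b => b
    | none => true

-- ===== PORT B =====
-- rule[i] in '<>' and rule[i-2:i] == rule[i+1:i+3]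
def pvOneChar (r : List Char) (i : Nat) : Bool :=
  (r[i]? == some '<' || r[i]? == some '>') &&
  (PySem.List.slice r (some ((i : Int) - 2)) (some (i : Int))
     == PySem.List.slice r (some ((i : Int) + 1)) (some ((i : Int) + 3)))

-- rule[i:i+2] in ('<=','>=','!=','==') and rule[i-2:i] == rule[i+2:i+4]
-- op = rule[i:i+2]
def pvOp (r : List Char) (i : Nat) : List Char :=
  PySem.List.slice r (some (i : Int)) (some ((i : Int) + 2))

def pvTwoChar (r : List Char) (i : Nat) : Bool :=
  (pvOp r i == ['<','='] || pvOp r i == ['>','='] || pvOp r i == ['!','='] || pvOp r i == ['=','=']) &&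
  (PySem.List.slice r (some ((i : Int) - 2)) (some (i : Int))
     == PySem.List.slice r (some ((i : Int) + 2)) (some ((i : Int) + 4)))

def pvAltLoop (r : List Char) : List Nat → Bool
  | [] => true
  | i :: rest =>
    if pvOneChar r i then false
    else if pvTwoChar r i then false
    else pvAltLoop r rest

def is_valid_comparison_rule_alt (rule : String) : Bool :=
  let r := PySem.Chars.replace rule.toList [' '] []
  pvAltLoop r (List.range r.length)

-- ===== PRECONDITION & SPEC =====
def Spec_is_valid_comparison_rule (rule : String) (out : Bool) : Prop := out = is_valid_comparison_rule_alt rule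
instance (rule : String) (out : Bool) : Decidable (Spec_is_valid_comparison_rule rule out) := by unfold Spec_is_valid_comparison_rule; infer_instance

-- ===== CLAIM (what is proved, stated in full; the proofs are below) =====
def Claim_equal_is_valid_comparison_rule : Prop := ∀ (rule : String), Dom_is_valid_comparison_rule rule → Spec_is_valid_comparison_rule rule (is_valid_comparison_rule rule)


-- ===== LEMMAS AND PROOFS =====

-- A's inner check at position p with operator width incr, as a Bool
def pvHit (r : List Char) (incr p : Int) : Bool :=
  decide ((pvGetv r p incr).1 = (pvGetv r p incr).2)

theorem pvInnerA_eq (r : List Char) (incr : Int) (pos : List Int) :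
    pvInnerA r incr pos = if pos.any (pvHit r incr) then some false else none := by
  induction pos with
  | nil => simp [pvInnerA]
  | cons p rest ih =>
    simp only [pvInnerA, List.any_cons, pvHit]
    by_cases h : (pvGetv r p incr).1 = (pvGetv r p incr).2 <;> simp [h, ih, pvHit]

theorem pvLoop2_eq (r : List Char) (chs : List (List Char)) :
    pvLoop2 r chs
      = if chs.any (fun ch => (pvPos2 r ch).any (pvHit r 1)) then some false else none := by
  induction chs with
  | nil => simp [pvLoop2]
  | cons ch rest ih =>
    simp only [pvLoop2, List.any_cons, pvInnerA_eq]
    by_cases hp : (pvPos2 r ch).any (pvHit r 1) = true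
    · have hlen : 0 < (pvPos2 r ch).length := by
        rcases List.any_eq_true.mp hp with ⟨x, hx, _⟩
        exact List.length_pos_of_mem hx
      simp [hlen, hp]
    · by_cases hl : 0 < (pvPos2 r ch).length <;> simp [hl, hp, ih]

theorem pvLoop1_eq (r : List Char) (chs : List Char) :
    pvLoop1 r chs
      = if chs.any (fun ch => (pvPos1 r ch).any (pvHit r 0)) then some false else none := by
  induction chs with
  | nil => simp [pvLoop1]
  | cons ch rest ih =>
    simp only [pvLoop1, List.any_cons, pvInnerA_eq]
    by_cases hp : (pvPos1 r ch).any (pvHit r 0) = true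
    · have hlen : 0 < (pvPos1 r ch).length := by
        rcases List.any_eq_true.mp hp with ⟨x, hx, _⟩
        exact List.length_pos_of_mem hx
      simp [hlen, hp]
    · by_cases hl : 0 < (pvPos1 r ch).length <;> simp [hl, hp, ih]

theorem pvAltLoop_eq (r : List Char) (l : List Nat) :
    pvAltLoop r l = !(l.any (fun i => pvOneChar r i || pvTwoChar r i)) := by
  induction l with
  | nil => simp [pvAltLoop]
  | cons i rest ih =>
    simp only [pvAltLoop, List.any_cons]
    by_cases h1 : pvOneChar r i = true
    · simp [h1]
    · by_cases h2 : pvTwoChar r i = true <;> simp [h1, h2, ih]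

theorem pvGetv_one (r : List Char) (p : Int) :
    pvGetv r p 1
      = (PySem.List.slice r (some (p - 2)) (some p),
         PySem.List.slice r (some (p + 2)) (some (p + 4))) := by
  have h3 : p + 1 + 1 = p + 2 := by ring
  have h4 : p + 1 + 3 = p + 4 := by ring
  rw [pvGetv, h3, h4]

theorem pvGetv_zero (r : List Char) (p : Int) :
    pvGetv r p 0
      = (PySem.List.slice r (some (p - 2)) (some p),
         PySem.List.slice r (some (p + 1)) (some (p + 3))) := by
  have h3 : p + 0 + 1 = p + 1 := by ring
  have h4 : p + 0 + 3 = p + 3 := by ring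
  rw [pvGetv, h3, h4]

-- startswith(ch, i) for a 2-char ch is exactly 'rule[i:i+2] == ch'
theorem pvSw_iff (r ch : List Char) (h2 : ch.length = 2) (i : Nat) :
    PySem.Chars.startswith (r.drop i) ch = true
      ↔ PySem.List.slice r (some (i : Int)) (some ((i : Int) + 2)) = ch := by
  rw [PySem.Chars.startswith_iff, List.prefix_iff_eq_take, h2]
  have hs : PySem.List.slice r (some (i : Int)) (some ((i : Int) + 2)) = (r.drop i).take 2 := by
    have := PySem.List.slice_natCast_add (xs := r) (j := i) (n := 2)
    simpa using this
  rw [hs]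
  exact ⟨fun h => h.symm, fun h => h.symm⟩

theorem pvPos2_mem (r ch : List Char) (p : Int) :
    p ∈ pvPos2 r ch
      ↔ ∃ i : Nat, i < r.length ∧ PySem.Chars.startswith (r.drop i) ch = true ∧ p = (i : Int) := by
  constructor
  · intro hp
    simp only [pvPos2, List.mem_map, List.mem_filter, List.mem_range] at hp
    rcases hp with ⟨i, ⟨hi, hsw⟩, rfl⟩
    exact ⟨i, hi, hsw, by simp⟩
  · rintro ⟨i, hi, hsw, rfl⟩
    simp only [pvPos2, List.mem_map, List.mem_filter, List.mem_range]
    exact ⟨i, ⟨hi, hsw⟩, by simp⟩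

theorem pvPos1_mem (r : List Char) (ch : Char) (p : Int) :
    p ∈ pvPos1 r ch
      ↔ ∃ (i : Nat) (h : i < r.length), r[i] = ch ∧ p = (i : Int) := by
  constructor
  · intro hp
    simp only [pvPos1, List.mem_map, List.mem_filter] at hp
    rcases hp with ⟨pc, ⟨he, hch⟩, rfl⟩
    rcases (PySem.List.mem_enumerate_iff _ _ _).mp he with ⟨k, hk, rfl⟩
    exact ⟨k, hk, by simpa using hch, by simp⟩
  · rintro ⟨i, hi, hch, rfl⟩
    simp only [pvPos1, List.mem_map, List.mem_filter]
    exact ⟨((0 : Int) + i, r[i]), ⟨(PySem.List.mem_enumerate_iff _ _ _).mpr ⟨i, hi, rfl⟩,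
      by simp [hch]⟩, by simp⟩

theorem pvFwd2 (r ch : List Char)
    (hmem : ch ∈ [['<','='], ['>','='], ['!','='], ['=','=']])
    (h : ∃ x ∈ pvPos2 r ch, pvHit r 1 x = true) :
    ∃ i, i < r.length ∧ (pvOneChar r i = true ∨ pvTwoChar r i = true) := by
  rcases h with ⟨p, hp, hhit⟩
  rcases (pvPos2_mem r ch p).mp hp with ⟨i, hi, hsw, rfl⟩
  have h2 : ch.length = 2 := by fin_cases hmem <;> rfl
  have hop : PySem.List.slice r (some (i : Int)) (some ((i : Int) + 2)) = ch :=
    (pvSw_iff r ch h2 i).mp hsw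
  have hq : (pvGetv r (i : Int) 1).1 = (pvGetv r (i : Int) 1).2 := by
    simpa [pvHit] using hhit
  rw [pvGetv_one] at hq
  refine ⟨i, hi, Or.inr ?_⟩
  simp only [pvTwoChar, pvOp, Bool.and_eq_true, Bool.or_eq_true, beq_iff_eq]
  refine ⟨?_, hq⟩
  fin_cases hmem <;> simp [hop]

theorem pvFwd1 (r : List Char) (ch : Char) (hmem : ch = '<' ∨ ch = '>')
    (h : ∃ x ∈ pvPos1 r ch, pvHit r 0 x = true) :
    ∃ i, i < r.length ∧ (pvOneChar r i = true ∨ pvTwoChar r i = true) := by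
  rcases h with ⟨p, hp, hhit⟩
  rcases (pvPos1_mem r ch p).mp hp with ⟨i, hi, hch, rfl⟩
  have hq : (pvGetv r (i : Int) 0).1 = (pvGetv r (i : Int) 0).2 := by
    simpa [pvHit] using hhit
  rw [pvGetv_zero] at hq
  refine ⟨i, hi, Or.inl ?_⟩
  simp only [pvOneChar, Bool.and_eq_true, Bool.or_eq_true, beq_iff_eq]
  refine ⟨?_, hq⟩
  rcases hmem with rfl | rfl
  · exact Or.inl (by rw [List.getElem?_eq_getElem hi, hch])
  · exact Or.inr (by rw [List.getElem?_eq_getElem hi, hch])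

theorem pvC_eq (r : List Char) :
    (([['<','='], ['>','='], ['!','='], ['=','=']].any (fun ch => (pvPos2 r ch).any (pvHit r 1)))
      || (['<', '>'].any (fun ch => (pvPos1 r ch).any (pvHit r 0))))
    = (List.range r.length).any (fun i => pvOneChar r i || pvTwoChar r i) := by
  rw [Bool.eq_iff_iff]
  simp only [List.any_cons, List.any_nil, Bool.or_false, Bool.or_eq_true, List.any_eq_true,
    List.mem_range]
  constructor
  · rintro ((h | h | h | h) | (h | h))
    · exact pvFwd2 r _ (by simp) h
    · exact pvFwd2 r _ (by simp) h
    · exact pvFwd2 r _ (by simp) h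
    · exact pvFwd2 r _ (by simp) h
    · exact pvFwd1 r _ (Or.inl rfl) h
    · exact pvFwd1 r _ (Or.inr rfl) h
  · rintro ⟨i, hi, h | h⟩
    · -- one-char hit at i
      simp only [pvOneChar, Bool.and_eq_true, Bool.or_eq_true, beq_iff_eq] at h
      obtain ⟨hc, hsl⟩ := h
      have hhit : pvHit r 0 (i : Int) = true := by
        have hq : (pvGetv r (i : Int) 0).1 = (pvGetv r (i : Int) 0).2 := by
          rw [pvGetv_zero]; exact hsl
        simpa [pvHit] using hq
      rcases hc with hc | hc
      · refine Or.inr (Or.inl ⟨(i : Int), ?_, hhit⟩)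
        refine (pvPos1_mem r '<' (i : Int)).mpr ⟨i, hi, ?_, rfl⟩
        rw [List.getElem?_eq_getElem hi] at hc
        exact Option.some.inj hc
      · refine Or.inr (Or.inr ⟨(i : Int), ?_, hhit⟩)
        refine (pvPos1_mem r '>' (i : Int)).mpr ⟨i, hi, ?_, rfl⟩
        rw [List.getElem?_eq_getElem hi] at hc
        exact Option.some.inj hc
    · -- two-char hit at i
      simp only [pvTwoChar, pvOp, Bool.and_eq_true, Bool.or_eq_true, beq_iff_eq] at h
      obtain ⟨hop, hsl⟩ := h
      have hhit : pvHit r 1 (i : Int) = true := by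
        have hq : (pvGetv r (i : Int) 1).1 = (pvGetv r (i : Int) 1).2 := by
          rw [pvGetv_one]; exact hsl
        simpa [pvHit] using hq
      have mk2 : ∀ ch : List Char, ch.length = 2 →
          PySem.List.slice r (some (i : Int)) (some ((i : Int) + 2)) = ch →
          ∃ x ∈ pvPos2 r ch, pvHit r 1 x = true := by
        intro ch h2 hopch
        exact ⟨(i : Int), (pvPos2_mem r ch (i : Int)).mpr
          ⟨i, hi, (pvSw_iff r ch h2 i).mpr hopch, rfl⟩, hhit⟩
      rcases hop with ((hop | hop) | hop) | hop
      · exact Or.inl (Or.inl (mk2 _ rfl hop))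
      · exact Or.inl (Or.inr (Or.inl (mk2 _ rfl hop)))
      · exact Or.inl (Or.inr (Or.inr (Or.inl (mk2 _ rfl hop))))
      · exact Or.inl (Or.inr (Or.inr (Or.inr (mk2 _ rfl hop))))

theorem pv_main (rule : String) : is_valid_comparison_rule rule = is_valid_comparison_rule_alt rule := by
  unfold is_valid_comparison_rule is_valid_comparison_rule_alt
  simp only [pvLoop2_eq, pvLoop1_eq, pvAltLoop_eq, ← pvC_eq]
  set r := PySem.Chars.replace rule.toList [' '] [] with hr
  by_cases h2 : ([['<','='], ['>','='], ['!','='], ['=','=']].any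
      (fun ch => (pvPos2 r ch).any (pvHit r 1))) = true
  · simp [h2]
  · by_cases h1 : (['<', '>'].any (fun ch => (pvPos1 r ch).any (pvHit r 0))) = true
    all_goals simp [h1, h2]

-- ===== VERDICT (by name: the statement is the Claim_ definition above) =====
theorem is_valid_comparison_rule_spec : Claim_equal_is_valid_comparison_rule := by
  intro rule _
  unfold Spec_is_valid_comparison_rule
  exact pv_main rule
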